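-- pv_equiv track=rewrite | github.com/xl666/recursosEstructuras24 | parcial1/estudiantes/Gael/suma_columna_ACG.py | suma_columna
-- ===== SOURCE A (Python) =====
-- def suma_columna(matriz):
--     aux=[0]*max(len(fila) for fila in matriz)
--     for fila in matriz:
--         for columna in range (len(fila)):
--                 aux[columna]+=fila[columna]
--     for i in range(len(aux)):
--          aux[i]=str(aux[i])
--     return ','.join(aux)
-- ===== SOURCE B (Python) =====
-- def suma_columna(matriz):
--     ancho = max(map(len, matriz), default=0)
--     return ','.join(
--         str(sum(fila[j] for fila in matriz if j < len(fila)))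
--         for j in range(ancho))
-- ===== Notes on version B (the rewrite author's own statement) =====
-- stated objective: idiomatic
-- what changed: B transposes the ragged matrix column-by-column and sums each column with a generator expression, instead of A's mutate-an-aux-array accumulation pass followed by an in-place str conversion loop.
import Mathlib
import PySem

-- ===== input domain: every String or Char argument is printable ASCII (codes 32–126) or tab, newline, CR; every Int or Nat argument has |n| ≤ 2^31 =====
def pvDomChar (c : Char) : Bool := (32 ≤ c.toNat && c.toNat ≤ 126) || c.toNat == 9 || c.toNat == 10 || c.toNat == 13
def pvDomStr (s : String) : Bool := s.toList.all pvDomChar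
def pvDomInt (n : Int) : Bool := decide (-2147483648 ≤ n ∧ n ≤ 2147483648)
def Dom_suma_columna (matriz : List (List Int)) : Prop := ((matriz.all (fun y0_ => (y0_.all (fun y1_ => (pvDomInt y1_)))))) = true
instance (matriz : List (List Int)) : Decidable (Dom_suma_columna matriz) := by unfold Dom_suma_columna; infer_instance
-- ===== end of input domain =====

-- B sums each column directly (transpose-style, one generator per column) instead of
-- A's accumulate-into-aux mutation pass; Pre_ excludes the empty matrix, where A raises.

-- ===== PORT A =====
-- aux=[0]*max(len(fila) for fila in matriz); nested accumulation; str-convert; join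
def suma_columna (matriz : List (List Int)) : String :=
  let m := (matriz.map List.length).foldl Nat.max 0
  let aux := List.replicate m (0 : Int)
  let aux := matriz.foldl (fun aux fila =>
      (List.range fila.length).foldl
        (fun aux c => aux.set c (aux.getD c 0 + fila.getD c 0)) aux) aux
  String.intercalate "," (aux.map PySem.Int.toStr)

-- ===== PORT B =====
-- ','.join(str(sum(fila[j] for fila in matriz if j < len(fila))) for j in range(ancho))
def suma_columna_alt (matriz : List (List Int)) : String :=
  let ancho := (matriz.map List.length).foldl Nat.max 0
  String.intercalate "," ((List.range ancho).map (fun j =>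
    PySem.Int.toStr (((matriz.filter (fun fila => decide (j < fila.length))).map
      (fun fila => fila.getD j 0)).sum)))

-- ===== PRECONDITION & SPEC =====
-- Pre_ excludes only the empty matrix, on which A raises ValueError (max() of an empty sequence).
def Pre_suma_columna (matriz : List (List Int)) : Prop := matriz ≠ []
instance (matriz : List (List Int)) : Decidable (Pre_suma_columna matriz) := by unfold Pre_suma_columna; infer_instance
def pvWitness_suma_columna : List (List Int) := [[1, 2], [3]]

def Spec_suma_columna (matriz : List (List Int)) (out : String) : Prop := out = suma_columna_alt matriz
instance (matriz : List (List Int)) (out : String) : Decidable (Spec_suma_columna matriz out) := by unfold Spec_suma_columna; infer_instance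

-- ===== CLAIM (what is proved, stated in full; the proofs are below) =====
def Claim_equal_suma_columna : Prop := ∀ (matriz : List (List Int)), Dom_suma_columna matriz → Pre_suma_columna matriz → Spec_suma_columna matriz (suma_columna matriz)

-- ===== LEMMAS AND PROOFS =====

-- the column-sum B computes at index j
def colsum (matriz : List (List Int)) (j : Nat) : Int :=
  ((matriz.filter (fun fila => decide (j < fila.length))).map (fun fila => fila.getD j 0)).sum

-- inner loop of A: length preserved and pointwise effect
lemma inner_loop (fila : List Int) (n : Nat) (aux : List Int) (hn : n ≤ aux.length) :
    ((List.range n).foldl (fun a c => a.set c (a.getD c 0 + fila.getD c 0)) aux).length = aux.length ∧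
    ∀ j, ((List.range n).foldl (fun a c => a.set c (a.getD c 0 + fila.getD c 0)) aux).getD j 0
        = aux.getD j 0 + (if j < n then fila.getD j 0 else 0) := by
  induction n with
  | zero => simp
  | succ n ih =>
    have hn' : n ≤ aux.length := Nat.le_of_succ_le hn
    obtain ⟨hl, hp⟩ := ih hn'
    rw [List.range_succ, List.foldl_append]
    set r := (List.range n).foldl (fun a c => a.set c (a.getD c 0 + fila.getD c 0)) aux with hr
    constructor
    · simp [hl]
    · intro j
      simp only [List.foldl_cons, List.foldl_nil]
      by_cases hj : j = n
      · subst hj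
        rw [List.getD_eq_getElem?_getD, List.getElem?_set_self (by omega), Option.getD_some,
          hp j, if_neg (Nat.lt_irrefl j), if_pos (Nat.lt_succ_self j)]
        ring
      · rw [List.getD_eq_getElem?_getD, List.getElem?_set_ne (by omega),
          ← List.getD_eq_getElem?_getD, hp j]
        by_cases h2 : j < n
        · rw [if_pos h2, if_pos (Nat.lt_succ_of_lt h2)]
        · rw [if_neg h2, if_neg (by omega)]

-- outer loop of A: pointwise effect, given every row fits in aux
lemma outer_loop (matriz : List (List Int)) (aux : List Int)
    (h : ∀ fila ∈ matriz, fila.length ≤ aux.length) :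
    (matriz.foldl (fun aux fila =>
      (List.range fila.length).foldl (fun a c => a.set c (a.getD c 0 + fila.getD c 0)) aux) aux).length = aux.length ∧
    ∀ j, (matriz.foldl (fun aux fila =>
      (List.range fila.length).foldl (fun a c => a.set c (a.getD c 0 + fila.getD c 0)) aux) aux).getD j 0
      = aux.getD j 0 + colsum matriz j := by
  induction matriz generalizing aux with
  | nil => simp [colsum]
  | cons fila rest ih =>
    obtain ⟨hl, hp⟩ := inner_loop fila fila.length aux (h fila (List.mem_cons_self))
    set r := (List.range fila.length).foldl (fun a c => a.set c (a.getD c 0 + fila.getD c 0)) aux with hrdef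
    have hrest : ∀ f ∈ rest, f.length ≤ r.length := by
      intro f hf; rw [hl]; exact h f (List.mem_cons_of_mem _ hf)
    obtain ⟨hl2, hp2⟩ := ih r hrest
    simp only [List.foldl_cons]
    refine ⟨by rw [hl2, hl], fun j => ?_⟩
    rw [hp2 j, hp j]
    simp only [colsum, List.filter_cons]
    by_cases hj : j < fila.length
    · simp only [hj, decide_true, if_pos trivial, List.map_cons, List.sum_cons]
      ring
    · simp only [hj, decide_false]
      simp only [if_false]
      ring_nf
      rfl

-- every row's length is at most the folded max
lemma le_foldl_max_init (ls : List Nat) (a : Nat) : a ≤ ls.foldl Nat.max a := by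
  induction ls generalizing a with
  | nil => simp
  | cons y ys ih => exact le_trans (Nat.le_max_left a y) (ih _)

lemma len_le_foldl_max (ls : List Nat) (a : Nat) (x : Nat) (hx : x ∈ ls) :
    x ≤ ls.foldl Nat.max a := by
  induction ls generalizing a with
  | nil => cases hx
  | cons y ys ih =>
    rcases List.mem_cons.mp hx with rfl | h
    · exact le_trans (Nat.le_max_right a x) (le_foldl_max_init ys _)
    · exact ih _ h

-- ===== VERDICT (by name: the statement is the Claim_ definition above) =====
theorem suma_columna_spec : Claim_equal_suma_columna := by
  intro matriz _ _
  unfold Spec_suma_columna suma_columna suma_columna_alt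
  simp only
  set m := (matriz.map List.length).foldl Nat.max 0 with hm
  have hfit : ∀ fila ∈ matriz, fila.length ≤ (List.replicate m (0:Int)).length := by
    intro fila hf
    rw [List.length_replicate]
    exact len_le_foldl_max _ 0 _ (List.mem_map_of_mem hf)
  obtain ⟨hl, hp⟩ := outer_loop matriz (List.replicate m (0:Int)) hfit
  rw [List.length_replicate] at hl
  congr 1
  apply List.ext_getElem
  · rw [List.length_map, List.length_map, List.length_range, hl]
  · intro j h1 h2
    have hjm : j < m := by rw [List.length_map, hl] at h1; exact h1
    rw [List.getElem_map, List.getElem_map, List.getElem_range]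
    congr 1
    have := hp j
    rw [List.getD_eq_getElem?_getD, List.getElem?_eq_getElem (by omega)] at this
    simp only [Option.getD_some] at this
    rw [this]
    rw [List.getD_eq_getElem?_getD, List.getElem?_replicate, if_pos hjm]
    simp [colsum]
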